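-- pv_equiv track=rewrite | github.com/hongmyeoun/algorithm | 프로그래머스/unrated/181918. 배열 만들기 4/배열 만들기 4.py | solution
-- ===== SOURCE A (Python) =====
-- def solution(arr):
--     stk = []
--     i = 0
--     while i < len(arr):
--         a = arr[i]
--         if len(stk)==0 or stk[-1] < a:
--             stk.append(a)
--             i += 1
--         else:
--             stk.pop()
--     return stk
-- ===== SOURCE B (Python) =====
-- def solution(arr):
--     # single right-to-left pass: keep arr[i] iff it is strictly below the
--     # minimum of everything to its right (no stack, no pop loop)
--     res = []
--     m = None  # running minimum of the elements already seen (to the right)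
--     for a in reversed(arr):
--         if m is None or a < m:
--             res.append(a)
--             m = a
--     return res[::-1]
-- ===== Notes on version B (the rewrite author's own statement) =====
-- stated objective: alternative
-- what changed: Replaced the stack with pop-back-on->= loop by a single right-to-left pass that keeps an element exactly when it is strictly below the running minimum of the elements to its right; no stack and no re-visiting of indices.
import Mathlib
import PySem

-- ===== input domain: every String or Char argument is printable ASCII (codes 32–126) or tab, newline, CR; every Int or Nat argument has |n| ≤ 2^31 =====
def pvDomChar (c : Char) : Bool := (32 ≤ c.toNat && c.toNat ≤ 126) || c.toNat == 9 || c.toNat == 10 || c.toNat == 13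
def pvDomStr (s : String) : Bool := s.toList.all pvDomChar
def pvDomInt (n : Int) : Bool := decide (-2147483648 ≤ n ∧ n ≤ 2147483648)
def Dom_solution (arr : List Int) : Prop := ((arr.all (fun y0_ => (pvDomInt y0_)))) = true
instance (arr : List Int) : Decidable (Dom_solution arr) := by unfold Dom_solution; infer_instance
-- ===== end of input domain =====

-- B replaces A's stack/pop-back loop by one right-to-left running-minimum pass (objective: alternative, same cost).

-- ===== PORT A =====
-- A's while-loop with index i and stack stk; stack held head-as-top (Python append/stk[-1]/pop
-- become cons/head/tail), so the returned stack is reversed at the end.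
-- fuel makes the while-loop structural; 2*len+1 fuel always suffices (each step pushes
-- with i+1 or pops), so the fuel-out arm is never reached on the actual call.
def solGo (arr : List Int) : Nat → Nat → List Int → List Int
  | 0, _, stk => stk
  | fuel+1, i, stk =>
    if h : i < arr.length then
      match stk with
      | [] => solGo arr fuel (i+1) [arr[i]]            -- len(stk)==0: append, i += 1
      | t :: s =>
        if t < arr[i] then solGo arr fuel (i+1) (arr[i] :: t :: s)  -- stk[-1] < a: append, i += 1
        else solGo arr fuel i s                                      -- else: pop
    else stk

def solution (arr : List Int) : List Int :=
  (solGo arr (2 * arr.length + 1) 0 []).reverse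

-- ===== PORT B =====
-- Source B: iterate over reversed(arr) with running minimum m (Option Int for None),
-- append kept elements, then reverse (res[::-1]).
def solution_alt (arr : List Int) : List Int :=
  (arr.reverse.foldl (fun (st : Option Int × List Int) a =>
    match st.1 with
    | none => (some a, st.2 ++ [a])
    | some mv => if a < mv then (some a, st.2 ++ [a]) else st) (none, [])).2.reverse

-- ===== PRECONDITION & SPEC =====
def Spec_solution (arr : List Int) (out : List Int) : Prop := out = solution_alt arr
instance (arr : List Int) (out : List Int) : Decidable (Spec_solution arr out) := by unfold Spec_solution; infer_instance

-- ===== CLAIM (what is proved, stated in full; the proofs are below) =====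
def Claim_equal_solution : Prop := ∀ (arr : List Int), Dom_solution arr → Spec_solution arr (solution arr)

-- ===== LEMMAS AND PROOFS =====

-- proof-side reformulation of A's loop on the remaining suffix of arr
def run : List Int → List Int → List Int
  | [], stk => stk
  | a :: l, stk =>
    match stk with
    | [] => run l [a]
    | t :: s => if t < a then run l (a :: t :: s) else run (a :: l) s
termination_by l stk => 2 * l.length + stk.length
decreasing_by all_goals simp_all <;> omega

-- common specification: keep a iff a is strictly below everything to its right
def f : List Int → List Int
  | [] => []
  | a :: rest => (if rest.all (fun y => decide (a < y)) then [a] else []) ++ f rest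

-- running minimum of B's pass
def minO : List Int → Option Int
  | [] => none
  | a :: rest =>
    match minO rest with
    | none => some a
    | some mv => if a < mv then some a else some mv

lemma minO_eq_none : ∀ (r : List Int), minO r = none → r = [] := by
  intro r h
  cases r with
  | nil => rfl
  | cons b t =>
      cases h' : minO t <;> simp [minO, h'] at h
      split at h <;> simp_all

lemma run_cons_cons (a t : Int) (l s : List Int) :
    run (a :: l) (t :: s) = if t < a then run l (a :: t :: s) else run (a :: l) s := by
  rw [run]

lemma solGo_succ (arr : List Int) (fuel i : Nat) (stk : List Int) :
    solGo arr (fuel+1) i stk =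
      if h : i < arr.length then
        match stk with
        | [] => solGo arr fuel (i+1) [arr[i]]
        | t :: s =>
          if t < arr[i] then solGo arr fuel (i+1) (arr[i] :: t :: s)
          else solGo arr fuel i s
      else stk := rfl

lemma solGo_eq_run (arr : List Int) : ∀ (fuel i : Nat) (stk : List Int),
    2 * (arr.length - i) + stk.length < fuel →
    solGo arr fuel i stk = run (arr.drop i) stk := by
  intro fuel
  induction fuel with
  | zero => intro i stk hf; omega
  | succ fuel ih =>
      intro i stk hf
      by_cases h : i < arr.length
      · rw [solGo_succ, dif_pos h, List.drop_eq_getElem_cons h]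
        cases stk with
        | nil =>
            rw [run]
            exact ih (i+1) [arr[i]]
              (by simp only [List.length_cons, List.length_nil] at hf ⊢; omega)
        | cons t s =>
            rw [run_cons_cons]
            show (if t < arr[i] then solGo arr fuel (i+1) (arr[i] :: t :: s)
                  else solGo arr fuel i s) = _
            split_ifs with hlt
            · exact ih (i+1) (arr[i] :: t :: s)
                (by simp only [List.length_cons] at hf ⊢; omega)
            · rw [← List.drop_eq_getElem_cons h]
              exact ih i s (by simp only [List.length_cons] at hf ⊢; omega)
      · rw [solGo_succ, dif_neg h, List.drop_eq_nil_of_le (by omega), run]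

lemma run_split : ∀ (n : Nat) (l stk : List Int), 2 * l.length + stk.length ≤ n →
    stk.Pairwise (· > ·) →
    run l stk = run l [] ++ stk.filter (fun x => l.all (fun y => decide (x < y))) := by
  intro n
  induction n with
  | zero =>
      intro l stk hle _
      have h1 : l.length = 0 := by omega
      have h2 : stk.length = 0 := by omega
      rw [List.length_eq_zero_iff] at h1 h2
      subst h1; subst h2; simp [run]
  | succ n ih =>
      intro l stk hle hp
      cases l with
      | nil => simp [run]
      | cons a rest =>
          cases stk with
          | nil => simp
          | cons t s =>
              have hps : s.Pairwise (· > ·) := (List.pairwise_cons.mp hp).2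
              by_cases hlt : t < a
              · rw [run_cons_cons, if_pos hlt]
                have hta : ∀ b ∈ t :: s, b < a := by
                  intro b hb
                  rcases List.mem_cons.mp hb with rfl | hb
                  · exact hlt
                  · have := (List.pairwise_cons.mp hp).1 b hb
                    omega
                have hp' : (a :: t :: s).Pairwise (· > ·) :=
                  List.pairwise_cons.mpr ⟨hta, hp⟩
                rw [ih rest (a :: t :: s) (by simp only [List.length_cons] at hle ⊢; omega) hp']
                rw [show run (a :: rest) [] = run rest [a] from by rw [run]]
                rw [ih rest [a] (by simp only [List.length_cons, List.length_nil] at hle ⊢; omega) (by simp)]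
                rw [List.append_assoc]
                congr 1
                have hcong : (t :: s).filter (fun x => rest.all (fun y => decide (x < y)))
                    = (t :: s).filter (fun x => (a :: rest).all (fun y => decide (x < y))) := by
                  apply List.filter_congr
                  intro x hx
                  have : x < a := hta x hx
                  simp [List.all_cons, this]
                rw [show (a :: t :: s) = [a] ++ (t :: s) from rfl, List.filter_append, hcong]
              · rw [run_cons_cons, if_neg hlt]
                rw [ih (a :: rest) s (by simp only [List.length_cons] at hle ⊢; omega) hps]
                congr 1
                rw [List.filter_cons]
                have : ((a :: rest).all (fun y => decide (t < y))) = false := by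
                  simp [List.all_cons, hlt]
                simp [this]

lemma run_nil_eq_f (l : List Int) : (run l []).reverse = f l := by
  induction l with
  | nil => simp [run, f]
  | cons a rest ih =>
      rw [show run (a :: rest) [] = run rest [a] from by rw [run]]
      rw [run_split (2 * rest.length + 1) rest [a] (by simp) (by simp)]
      rw [List.reverse_append, ih]
      show ([a].filter _).reverse ++ f rest = f (a :: rest)
      rw [f, List.filter_cons]
      split <;> simp_all

lemma keep_eq (a : Int) : ∀ (rest : List Int),
    (match minO rest with | none => true | some mv => decide (a < mv))
      = rest.all (fun y => decide (a < y)) := by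
  intro rest
  induction rest with
  | nil => simp [minO]
  | cons b r ih =>
      cases hm : minO r with
      | none =>
          have hr : r = [] := minO_eq_none r hm
          subst hr
          simp [minO]
      | some mv =>
          have ih' : decide (a < mv) = r.all (fun y => decide (a < y)) := by
            rw [← ih, hm]
          simp only [minO, hm, List.all_cons, ← ih']
          by_cases hb : b < mv
          · simp only [if_pos hb]
            by_cases hab : a < b
            · have ham : a < mv := by omega
              simp [hab, ham]
            · simp [hab]
          · simp only [if_neg hb]
            by_cases ham : a < mv
            · have hab : a < b := by omega
              simp [ham, hab]
            · simp [ham]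

lemma alt_fold (l : List Int) :
    l.reverse.foldl (fun (st : Option Int × List Int) a =>
      match st.1 with
      | none => (some a, st.2 ++ [a])
      | some mv => if a < mv then (some a, st.2 ++ [a]) else st) (none, [])
      = (minO l, (f l).reverse) := by
  induction l with
  | nil => simp [minO, f]
  | cons a rest ih =>
      rw [List.reverse_cons, List.foldl_append, ih, List.foldl_cons, List.foldl_nil]
      have hk := keep_eq a rest
      cases hm : minO rest with
      | none =>
          have hr : rest = [] := minO_eq_none rest hm
          subst hr
          simp [minO, f]
      | some mv =>
          rw [hm] at hk
          by_cases hab : a < mv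
          · simp only [hm, minO, f, ← hk]
            simp [hab]
          · simp only [hm, minO, f, ← hk]
            simp [hab]

-- ===== VERDICT (by name: the statement is the Claim_ definition above) =====
theorem solution_spec : Claim_equal_solution := by
  intro arr _
  unfold Spec_solution solution solution_alt
  rw [alt_fold, solGo_eq_run arr (2 * arr.length + 1) 0 []
      (by simp only [List.length_nil]; omega), List.drop_zero, run_nil_eq_f]
  simp
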